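-- pv_equiv track=rewrite | github.com/heitorchang/learn-code | battles/challenges/created/my-solutions/booAnalysis.py | isBoo
-- ===== SOURCE A (Python) =====
-- def isBoo(s):
--     if len(s) == 0:
--         return False
--     if s[0] == 'u':
--         return False
--     try:
--         uleftidx = s.index('u')
--     except ValueError:
--         return False
--
--     try:
--         urightidx = s.rindex('u') + 1
--     except ValueError:
--         return False
--
--     for i in range(uleftidx, urightidx):
--         if s[i] != 'u':
--             return False
--
--     leftos = s[:uleftidx]
--     rightos = s[urightidx:]
--
--     return leftos == rightos
-- ===== SOURCE B (Python) =====
-- def isBoo(s):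
--     n = len(s)
--     k = s.count('u')
--     if k == 0 or (n - k) % 2 != 0:
--         return False
--     p = (n - k) // 2
--     return p > 0 and s == s[:p] + 'u' * k + s[:p]
-- ===== Notes on version B (the rewrite author's own statement) =====
-- stated objective: alternative
-- what changed: Instead of scanning for the first/last 'u', verifying the middle span and comparing the two outer slices, B counts the u's, derives the unique possible prefix length p=(n-k)//2, rebuilds the canonical string s[:p]+'u'*k+s[:p] and compares it to s in one equality.
import Mathlib
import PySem

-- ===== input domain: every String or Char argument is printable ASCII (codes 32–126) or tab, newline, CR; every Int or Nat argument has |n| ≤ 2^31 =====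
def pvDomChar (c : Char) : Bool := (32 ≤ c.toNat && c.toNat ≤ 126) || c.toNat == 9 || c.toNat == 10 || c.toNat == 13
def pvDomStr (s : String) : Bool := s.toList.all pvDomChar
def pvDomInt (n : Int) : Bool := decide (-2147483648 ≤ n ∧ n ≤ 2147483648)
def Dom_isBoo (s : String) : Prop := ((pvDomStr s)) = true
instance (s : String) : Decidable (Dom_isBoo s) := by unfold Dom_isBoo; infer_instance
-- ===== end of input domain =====

-- B replaces A's first/last-u scans, middle-verification loop and two-slice comparison by a
-- different algorithm of the same cost: count the u's, derive the unique candidate prefix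
-- length p = (n-k)/2, rebuild the canonical string s[:p] + 'u'*k + s[:p] and compare it to s.


-- ===== PORT A =====
def isBoo (s : String) : Bool :=
  let L := s.toList
  if L.length = 0 then false
  else if PySem.List.pyGetD L 0 ' ' = 'u' then false
  else
    -- s.index('u'): find, with the -1 result as the caught-ValueError branch
    let uleftidx := PySem.Chars.find L ['u']
    if uleftidx = -1 then false
    else
      -- s.rindex('u') + 1: rfind, with rfind = -1 (i.e. this sum = 0) as the caught-ValueError branch
      let urightidx := PySem.Chars.rfind L ['u'] + 1
      if urightidx = 0 then false
      else if !((PySem.List.pyRange uleftidx urightidx 1).all fun i =>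
                  decide (PySem.List.pyGetD L i ' ' = 'u')) then false
      else
        let leftos := PySem.List.slice L none (some uleftidx)
        let rightos := PySem.List.slice L (some urightidx) none
        decide (leftos = rightos)

-- ===== PORT B =====
def isBoo_alt (s : String) : Bool :=
  let L := s.toList
  let n := L.length
  let k := PySem.Chars.count L ['u']      -- s.count('u'); k ≤ n, so Nat subtraction below is exact
  if k = 0 ∨ (n - k) % 2 ≠ 0 then false
  else
    let p := (n - k) / 2
    -- s == s[:p] + 'u' * k + s[:p]  ('u' * k ported as List.replicate k 'u'; k ≥ 0)
    decide (0 < p) &&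
      decide (L = PySem.List.slice L none (some (p : Int)) ++ List.replicate k 'u'
                    ++ PySem.List.slice L none (some (p : Int)))

-- ===== PRECONDITION & SPEC =====
def Spec_isBoo (s : String) (out : Bool) : Prop := out = isBoo_alt s
instance (s : String) (out : Bool) : Decidable (Spec_isBoo s out) := by unfold Spec_isBoo; infer_instance

-- ===== CLAIM (what is proved, stated in full; the proofs are below) =====
def Claim_equal_isBoo : Prop := ∀ (s : String), Dom_isBoo s → Spec_isBoo s (isBoo s)

-- ===== LEMMAS AND PROOFS =====

-- the body of isBoo_alt on the character list (rfl-equal to isBoo_alt s at L = s.toList)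
def pvB (L : List Char) : Bool :=
  let n := L.length
  let k := PySem.Chars.count L ['u']
  if k = 0 ∨ (n - k) % 2 ≠ 0 then false
  else
    let p := (n - k) / 2
    decide (0 < p) &&
      decide (L = PySem.List.slice L none (some (p : Int)) ++ List.replicate k 'u'
                    ++ PySem.List.slice L none (some (p : Int)))

-- [c].isPrefixOf l tests the head
theorem pv_isPrefixOf_singleton (c : Char) (l : List Char) :
    [c].isPrefixOf l = true ↔ l[0]? = some c := by
  rw [List.isPrefixOf_iff_prefix]
  cases l with
  | nil => simp
  | cons a t => simp [List.cons_prefix_cons, eq_comm]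

theorem pv_pref_drop (L : List Char) (j : Nat) :
    ['u'].isPrefixOf (L.drop j) = true ↔ L[j]? = some 'u' := by
  rw [pv_isPrefixOf_singleton]
  simp [List.getElem?_drop]

-- find.go on a first-occurrence decomposition
theorem pv_find_go (P R : List Char) (k : Nat) (hP : 'u' ∉ P) :
    PySem.Chars.find.go ['u'] (P ++ 'u' :: R) k = (k + P.length : Int) := by
  induction P generalizing k with
  | nil =>
    rw [PySem.Chars.find.go.eq_def]
    simp
  | cons a t ih =>
    rw [List.cons_append, PySem.Chars.find.go.eq_def]
    have ha : (['u'].isPrefixOf (a :: (t ++ 'u' :: R))) = false := by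
      rw [Bool.eq_false_iff]
      intro hc
      rw [pv_isPrefixOf_singleton] at hc
      simp at hc
      exact hP (by simp [hc])
    simp only [ha, Bool.false_eq_true, if_false]
    rw [ih (k + 1) (fun h => hP (List.mem_cons_of_mem a h))]
    push_cast [List.length_cons]; ring

-- rfind.go returns the highest index carrying 'u'
theorem pv_rfind_go (L : List Char) (n m : Nat) (hmn : m ≤ n)
    (hm : L[m]? = some 'u') (hj : ∀ j, m < j → j ≤ n → L[j]? ≠ some 'u') :
    PySem.Chars.rfind.go L ['u'] n = (m : Int) := by
  induction n with
  | zero =>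
    interval_cases m
    rw [PySem.Chars.rfind.go.eq_def]
    have h0 : ['u'].isPrefixOf L = true := by rw [pv_isPrefixOf_singleton]; simpa using hm
    simp [h0]
  | succ n ih =>
    rw [PySem.Chars.rfind.go.eq_def]
    by_cases hcase : m = n + 1
    · have h1 : ['u'].isPrefixOf (List.drop (n + 1) L) = true := by
        rw [pv_pref_drop]; exact hcase ▸ hm
      simp [h1, hcase]
    · have h1 : ['u'].isPrefixOf (List.drop (n + 1) L) = false := by
        rw [Bool.eq_false_iff]
        intro hc
        exact hj (n + 1) (by omega) (by omega) ((pv_pref_drop L (n + 1)).mp hc)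
      simp only [h1, Bool.false_eq_true, if_false]
      exact ih (by omega) (fun j hj1 hj2 => hj j hj1 (by omega))

-- first-occurrence split of a membership
theorem pv_mem_split (c : Char) (l : List Char) (h : c ∈ l) :
    ∃ a b, l = a ++ c :: b ∧ c ∉ a := by
  induction l with
  | nil => cases h
  | cons x t ih =>
    by_cases hx : x = c
    · exact ⟨[], t, by simp [hx], by simp⟩
    · rcases ih ((List.mem_cons.mp h).resolve_left fun hc => hx hc.symm) with ⟨a, b, he, hna⟩
      exact ⟨x :: a, b, by simp [he], by simp [hna]; exact fun hcx => hx hcx.symm⟩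

-- the first-occurrence split is unique
theorem pv_split_unique (P R P' R' : List Char)
    (h : P ++ 'u' :: R = P' ++ 'u' :: R') (hP : 'u' ∉ P) (hP' : 'u' ∉ P') :
    P = P' ∧ R = R' := by
  induction P generalizing P' with
  | nil =>
    cases P' with
    | nil => simpa using h
    | cons b t =>
      simp at h
      exact absurd (h.1 ▸ List.mem_cons_self) hP'
  | cons a tl ih =>
    cases P' with
    | nil =>
      simp at h
      exact absurd (h.1 ▸ List.mem_cons_self) hP
    | cons b t =>
      simp at h
      obtain ⟨hab, hrest⟩ := h
      obtain ⟨h1, h2⟩ := ih t hrest (fun hh => hP (List.mem_cons_of_mem a hh))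
        (fun hh => hP' (List.mem_cons_of_mem b hh))
      exact ⟨by simp [hab, h1], h2⟩

-- middle element of an append, as getElem?
theorem pv_getElem?_mid (A B : List Char) (i : Nat) (h : i < B.length) :
    (A ++ B)[A.length + i]? = some (B[i]'h) := by
  rw [List.getElem?_append_right (by omega)]
  simp [h]

theorem pv_getElem?_mid3 (A B C : List Char) (i : Nat) (h : i < B.length) :
    (A ++ B ++ C)[A.length + i]? = some (B[i]'h) := by
  rw [List.append_assoc, pv_getElem?_mid A (B ++ C) i (by simp; omega)]
  simp [List.getElem_append_left h]

theorem pv_getD_at (A T : List Char) (c d : Char) : (A ++ c :: T).getD A.length d = c := by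
  have h := pv_getElem?_mid A (c :: T) 0 (by simp)
  simp only [Nat.add_zero] at h
  simp [List.getD]

-- the first element surviving dropWhile falsifies the predicate
theorem pv_dropWhile_head (p : Char → Bool) (l : List Char) (q : Char) (Q' : List Char)
    (h : l.dropWhile p = q :: Q') : p q = false := by
  induction l with
  | nil => simp at h
  | cons a t ih =>
    rw [List.dropWhile_cons] at h
    by_cases hpa : p a = true
    · rw [if_pos hpa] at h
      exact ih h
    · rw [if_neg hpa] at h
      rw [← List.cons.injEq .. |>.mp h |>.1]
      exact Bool.eq_false_iff.mpr hpa

-- past an 'u'-free tail there is no 'u'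
theorem pv_no_u_after (A T : List Char) (hT : 'u' ∉ T) (j : Nat) (h1 : A.length ≤ j) :
    (A ++ T)[j]? ≠ some 'u' := by
  intro hc
  rw [List.getElem?_append_right h1] at hc
  exact hT (List.mem_of_getElem? hc)

-- ---- B-side lemmas ----

-- Python's substring count of the one-char pattern 'u' is the character count
theorem pv_count_go (l : List Char) (fuel acc : Nat) (h : l.length ≤ fuel) :
    PySem.Chars.count.go ['u'] fuel l acc = acc + l.count 'u' := by
  induction l generalizing fuel acc with
  | nil => rw [PySem.Chars.count.go.eq_def]; cases fuel <;> simp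
  | cons a t ih =>
    cases fuel with
    | zero => simp at h
    | succ f =>
      rw [PySem.Chars.count.go.eq_def]
      by_cases ha : a = 'u'
      · have hpre : ['u'].isPrefixOf (a :: t) = true := by
          rw [pv_isPrefixOf_singleton]; simp [ha]
        simp only [hpre, if_true]
        rw [show ([ 'u' ].length) = 1 from rfl]
        rw [List.drop_one, List.tail_cons, ih f (acc + 1) (by simpa using h)]
        simp [ha]
        omega
      · have hpre : ['u'].isPrefixOf (a :: t) = false := by
          rw [Bool.eq_false_iff]
          intro hc
          rw [pv_isPrefixOf_singleton] at hc
          simp at hc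
          exact ha hc
        simp only [hpre, Bool.false_eq_true, if_false]
        rw [ih f acc (by simpa using h)]
        simp [ha]

theorem pv_count_singleton (L : List Char) :
    PySem.Chars.count L ['u'] = L.count 'u' := by
  rw [PySem.Chars.count]
  simp [pv_count_go L L.length 0 le_rfl]

-- normalised form of pvB (slices resolved to take)
theorem pvB_char (L : List Char) :
    pvB L = (if L.count 'u' = 0 ∨ (L.length - L.count 'u') % 2 ≠ 0 then false
      else decide (0 < (L.length - L.count 'u') / 2) &&
        decide (L = L.take ((L.length - L.count 'u') / 2) ++ List.replicate (L.count 'u') 'u'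
                      ++ L.take ((L.length - L.count 'u') / 2))) := by
  simp only [pvB, pv_count_singleton]
  rw [PySem.List.slice_to _ (by positivity), Int.toNat_natCast]

-- if the rebuilt string equals L and k is the exact count, the outer part is u-free
theorem pv_recon_no_u (L T : List Char) (k : Nat) (hk : L.count 'u' = k)
    (hL : L = T ++ List.replicate k 'u' ++ T) : 'u' ∉ T := by
  have hc := congrArg (List.count 'u') hL
  rw [hk] at hc
  simp [List.count_append] at hc
  intro hmem
  have := List.count_pos_iff.mpr hmem
  omega

theorem pvB_no_u (L : List Char) (hu : 'u' ∉ L) : pvB L = false := by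
  rw [pvB_char]
  simp [List.count_eq_zero_of_not_mem hu]

theorem pvB_head_u (R : List Char) : pvB ('u' :: R) = false := by
  rw [pvB_char, Bool.eq_false_iff]
  intro htrue
  split_ifs at htrue with h
  rw [Bool.and_eq_true, decide_eq_true_eq, decide_eq_true_eq] at htrue
  obtain ⟨hp, hEq⟩ := htrue
  have hnu : 'u' ∉ ('u' :: R).take ((('u' :: R).length - ('u' :: R).count 'u') / 2) :=
    pv_recon_no_u _ _ _ rfl hEq
  apply hnu
  rw [List.take_cons (by omega)]
  exact List.mem_cons_self

theorem pvB_main (P R : List Char) (hPu : 'u' ∉ P) (hPne : P ≠ []) :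
    pvB (P ++ 'u' :: R) = decide (R.dropWhile (fun c => c == 'u') = P) := by
  have hkP : P.count 'u' = 0 := List.count_eq_zero_of_not_mem hPu
  have hk : (P ++ 'u' :: R).count 'u' = R.count 'u' + 1 := by
    simp [List.count_append, hkP]
  by_cases hQP : R.dropWhile (fun c => c == 'u') = P
  · -- the canonical shape: rebuild succeeds
    have hR : R = R.takeWhile (fun c => c == 'u') ++ P := by
      conv_lhs => rw [← List.takeWhile_append_dropWhile (p := fun c => c == 'u') (l := R), hQP]
    have htw : R.takeWhile (fun c => c == 'u')
        = List.replicate (R.takeWhile (fun c => c == 'u')).length 'u' := by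
      rw [List.eq_replicate_iff]
      exact ⟨rfl, fun b hb => by simpa using List.mem_takeWhile_imp hb⟩
    have hcR : R.count 'u' = (R.takeWhile (fun c => c == 'u')).length := by
      conv_lhs => rw [hR]
      rw [List.count_append, hkP]
      conv_lhs => rw [htw]
      simp
    have hlen : (P ++ 'u' :: R).length = 2 * P.length + 1 + (R.takeWhile (fun c => c == 'u')).length := by
      simp [List.length_append, List.length_cons]
      conv_lhs => rw [hR]
      simp
      omega
    have hsub : 2 * P.length + 1 + (R.takeWhile (fun c => c == 'u')).length
        - ((R.takeWhile (fun c => c == 'u')).length + 1) = 2 * P.length := by omega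
    have hdiv : (2 * P.length) / 2 = P.length := by omega
    rw [pvB_char, hk, hcR, hlen, hsub]
    have hcond : ¬(((R.takeWhile (fun c => c == 'u')).length + 1 = 0) ∨ (2 * P.length) % 2 ≠ 0) := by
      omega
    rw [if_neg hcond, hdiv]
    have htake : (P ++ 'u' :: R).take P.length = P := List.take_left' rfl
    have hrepl : List.replicate ((R.takeWhile (fun c => c == 'u')).length + 1) 'u'
        = 'u' :: R.takeWhile (fun c => c == 'u') := by
      rw [List.replicate_succ]
      conv_rhs => rw [htw]
    have hEq : P ++ 'u' :: R
        = P ++ List.replicate ((R.takeWhile (fun c => c == 'u')).length + 1) 'u' ++ P := by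
      rw [hrepl, List.append_assoc, List.cons_append, ← hR]
    have hpos : 0 < P.length := List.length_pos_iff.mpr hPne
    rw [htake]
    simp [hpos, hEq, hQP]
  · -- any other shape: rebuild fails
    rw [pvB_char, show decide (R.dropWhile (fun c => c == 'u') = P) = false by simp [hQP],
      Bool.eq_false_iff]
    intro htrue
    split_ifs at htrue with h
    rw [Bool.and_eq_true, decide_eq_true_eq, decide_eq_true_eq] at htrue
    obtain ⟨hp, hEq⟩ := htrue
    set L := P ++ 'u' :: R with hLdef
    set p := (L.length - L.count 'u') / 2 with hpdef
    set T := L.take p with hTdef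
    have hnu : 'u' ∉ T := pv_recon_no_u L T (L.count 'u') rfl hEq
    have hkpos : L.count 'u' ≠ 0 := by rw [hk]; omega
    have hTne : T ≠ [] := by
      intro hT0
      rw [hTdef, List.take_eq_nil_iff] at hT0
      rcases hT0 with h1 | h1
      · exact absurd h1 (by omega)
      · rw [hLdef] at h1; simp at h1
    have hrepl : List.replicate (L.count 'u') 'u'
        = 'u' :: List.replicate (L.count 'u' - 1) 'u' := by
      cases hc : L.count 'u' with
      | zero => exact absurd hc hkpos
      | succ m => simp [List.replicate_succ]
    have hEq2 : P ++ 'u' :: R = T ++ 'u' :: (List.replicate (L.count 'u' - 1) 'u' ++ T) := by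
      conv_lhs => rw [← hLdef, hEq, hrepl]
      simp
    obtain ⟨hPT, hRT⟩ := pv_split_unique P R T _ hEq2 hPu hnu
    apply hQP
    rw [hRT, List.dropWhile_append]
    have hdw : (List.replicate (L.count 'u' - 1) 'u').dropWhile (fun c => c == 'u') = [] := by
      rw [List.dropWhile_eq_nil_iff]
      intro x hx
      simp [List.eq_of_mem_replicate hx]
    rw [hdw]
    simp only [List.isEmpty_nil, if_true]
    obtain ⟨t, ts, hT⟩ := List.exists_cons_of_ne_nil hTne
    have htne : ¬ (t == 'u') = true := by
      simp only [beq_iff_eq]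
      intro hc
      exact hnu (hT ▸ hc ▸ List.mem_cons_self)
    rw [hT, List.dropWhile_cons, if_neg htne, ← hT, hPT]

-- ===== VERDICT (by name: the statement is the Claim_ definition above) =====
theorem isBoo_spec : Claim_equal_isBoo := by
  unfold Claim_equal_isBoo
  intro s _
  unfold Spec_isBoo
  rw [show isBoo_alt s = pvB s.toList from rfl]
  simp only [isBoo]
  generalize s.toList = L
  by_cases hu : 'u' ∈ L
  · obtain ⟨P, R, hL, hPu⟩ := pv_mem_split 'u' L hu
    subst hL
    by_cases hP0 : P = []
    · subst hP0
      simp only [List.nil_append]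
      rw [pvB_head_u]
      simp [PySem.List.pyGetD_zero_cons]
    · rw [pvB_main P R hPu hP0]
      obtain ⟨p, P', hPe⟩ := List.exists_cons_of_ne_nil hP0
      have hfind : PySem.Chars.find (P ++ 'u' :: R) ['u'] = (P.length : Int) := by
        have h := pv_find_go P R 0 hPu
        simpa [PySem.Chars.find] using h
      have hhead : PySem.List.pyGetD (P ++ 'u' :: R) 0 ' ' = p := by
        rw [hPe, List.cons_append, PySem.List.pyGetD_zero_cons]
      have hpne : ¬ p = 'u' := fun h => hPu (hPe ▸ h ▸ List.mem_cons_self)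
      have hU1u : ∀ c ∈ R.takeWhile (fun c => c == 'u'), c = 'u' := by
        intro c hc
        simpa using List.mem_takeWhile_imp hc
      have hRQ : R = R.takeWhile (fun c => c == 'u') ++ R.dropWhile (fun c => c == 'u') :=
        (List.takeWhile_append_dropWhile).symm
      by_cases hQu : 'u' ∈ R.dropWhile (fun c => c == 'u')
      · -- a later 'u' after the first run: A's all-'u' middle check fails, B's rebuild fails
        have hQne : R.dropWhile (fun c => c == 'u') ≠ [] := fun h => by simp [h] at hQu
        obtain ⟨q, Q', hQc⟩ := List.exists_cons_of_ne_nil hQne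
        have hqne : ¬ q = 'u' := by
          simpa using pv_dropWhile_head (fun c => c == 'u') R q Q' hQc
        obtain ⟨a1, b1, hQrev, ha1⟩ :=
          pv_mem_split 'u' (R.dropWhile (fun c => c == 'u')).reverse (by simpa using hQu)
        have hQe : R.dropWhile (fun c => c == 'u') = b1.reverse ++ 'u' :: a1.reverse := by
          have h2 := congrArg List.reverse hQrev
          simpa using h2
        have hL2 : P ++ 'u' :: R =
            (P ++ 'u' :: (R.takeWhile (fun c => c == 'u') ++ b1.reverse)) ++ 'u' :: a1.reverse := by
          conv_lhs => rw [hRQ, hQe]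
          simp
        have hL3 : P ++ 'u' :: R =
            (P ++ 'u' :: R.takeWhile (fun c => c == 'u')) ++ q :: Q' := by
          conv_lhs => rw [hRQ, hQc]
          simp
        have hrfind : PySem.Chars.rfind (P ++ 'u' :: R) ['u'] =
            ((P.length + 1 + (R.takeWhile (fun c => c == 'u')).length + b1.reverse.length : Nat) : Int) := by
          rw [PySem.Chars.rfind]
          apply pv_rfind_go
          · rw [hL2]; simp; omega
          · rw [hL2]
            rw [show P.length + 1 + (R.takeWhile (fun c => c == 'u')).length + b1.reverse.length
                = (P ++ 'u' :: (R.takeWhile (fun c => c == 'u') ++ b1.reverse)).length by simp; omega]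
            simp
          · intro j hj1 hj2
            rw [hL2, show (P ++ 'u' :: (R.takeWhile (fun c => c == 'u') ++ b1.reverse)) ++ 'u' :: a1.reverse
                = ((P ++ 'u' :: (R.takeWhile (fun c => c == 'u') ++ b1.reverse)) ++ ['u']) ++ a1.reverse by simp]
            apply pv_no_u_after
            · simpa using ha1
            · simp only [List.length_reverse] at hj1
              simp
              omega
        have hall : ((PySem.List.pyRange ((P.length : Nat) : Int)
              (((P.length + 1 + (R.takeWhile (fun c => c == 'u')).length + b1.reverse.length : Nat) : Int) + 1) 1).all
              fun i => decide (PySem.List.pyGetD (P ++ 'u' :: R) i ' ' = 'u')) = false := by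
          apply List.all_eq_false.mpr
          refine ⟨((P.length + 1 + (R.takeWhile (fun c => c == 'u')).length : Nat) : Int), ?_, ?_⟩
          · apply PySem.List.mem_pyRange_one.mpr
            constructor
            · push_cast; omega
            · push_cast; omega
          · rw [PySem.List.pyGetD_natCast, hL3,
              show P.length + 1 + (R.takeWhile (fun c => c == 'u')).length
                = (P ++ 'u' :: R.takeWhile (fun c => c == 'u')).length by simp; omega,
              pv_getD_at]
            simp [hqne]
        have hQP : ¬ (R.dropWhile (fun c => c == 'u') = P) := fun h => hPu (h ▸ hQu)
        simp only [hfind, hhead, hrfind, hall]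
        simp [hpne, hQP, show ¬ ((P.length : Int) = -1) by omega]
      · -- the u's are one contiguous run: both sides reduce to prefix = suffix
        have hWu : ∀ c ∈ 'u' :: R.takeWhile (fun c => c == 'u'), c = 'u' := by
          intro c hc
          rcases List.mem_cons.mp hc with h | h
          · exact h
          · exact hU1u c h
        have hL4 : P ++ 'u' :: R = P ++ 'u' :: R.takeWhile (fun c => c == 'u') ++ R.dropWhile (fun c => c == 'u') := by
          conv_lhs => rw [hRQ]
          simp
        have hrfind : PySem.Chars.rfind (P ++ 'u' :: R) ['u'] =
            ((P.length + (R.takeWhile (fun c => c == 'u')).length : Nat) : Int) := by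
          rw [PySem.Chars.rfind]
          apply pv_rfind_go
          · have hRlen : (R.takeWhile (fun c => c == 'u')).length ≤ R.length :=
              (List.takeWhile_sublist _).length_le
            simp
            omega
          · rw [hL4]
            have h := pv_getElem?_mid3 P ('u' :: R.takeWhile (fun c => c == 'u'))
              (R.dropWhile (fun c => c == 'u')) (R.takeWhile (fun c => c == 'u')).length (by simp)
            rw [h]
            have := hWu (('u' :: R.takeWhile (fun c => c == 'u'))[(R.takeWhile (fun c => c == 'u')).length]'(by simp))
              (List.getElem_mem _)
            simp [this]
          · intro j hj1 hj2
            rw [hL4]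
            apply pv_no_u_after (P ++ 'u' :: R.takeWhile (fun c => c == 'u')) _ hQu
            simp
            omega
        have hall : ((PySem.List.pyRange ((P.length : Nat) : Int)
              (((P.length + (R.takeWhile (fun c => c == 'u')).length : Nat) : Int) + 1) 1).all
              fun i => decide (PySem.List.pyGetD (P ++ 'u' :: R) i ' ' = 'u')) = true := by
          apply List.all_eq_true.mpr
          intro i hi
          obtain ⟨hi1, hi2⟩ := PySem.List.mem_pyRange_one.mp hi
          have h0i : 0 ≤ i := by omega
          have hlenL : ((P ++ 'u' :: R).length : Int) = P.length + 1 + R.length := by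
            push_cast [List.length_append, List.length_cons]; ring
          have hiL : i < ((P ++ 'u' :: R).length : Int) := by
            rw [hlenL]
            have hRlen : (R.takeWhile (fun c => c == 'u')).length ≤ R.length :=
              (List.takeWhile_sublist _).length_le
            push_cast at hi2 ⊢
            omega
          rw [PySem.List.pyGetD_eq_getElem _ _ h0i (by simpa using hiL)]
          have ht : i.toNat = P.length + (i.toNat - P.length) := by omega
          have htlt : i.toNat - P.length < ('u' :: R.takeWhile (fun c => c == 'u')).length := by
            simp only [List.length_cons]
            push_cast at hi2
            omega
          have h? : (P ++ 'u' :: R)[i.toNat]? =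
              some (('u' :: R.takeWhile (fun c => c == 'u'))[i.toNat - P.length]'htlt) := by
            conv_lhs => rw [hL4, ht]
            exact pv_getElem?_mid3 _ _ _ _ htlt
          have hval := hWu _ (List.getElem_mem htlt)
          have hg : (P ++ 'u' :: R)[i.toNat]'(by omega) = 'u' := by
            have := List.getElem?_eq_getElem (l := P ++ 'u' :: R) (i := i.toNat) (by omega)
            rw [this] at h?
            exact (Option.some.inj h?).trans hval
          simp [hg]
        have hslice1 : PySem.List.slice (P ++ 'u' :: R) none (some ((P.length : Nat) : Int)) = P := by
          rw [PySem.List.slice_to _ (by positivity)]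
          simp
        have hslice2 : PySem.List.slice (P ++ 'u' :: R)
            (some (((P.length + (R.takeWhile (fun c => c == 'u')).length : Nat) : Int) + 1)) none
            = R.dropWhile (fun c => c == 'u') := by
          rw [show (((P.length + (R.takeWhile (fun c => c == 'u')).length : Nat) : Int) + 1)
              = ((P.length + (R.takeWhile (fun c => c == 'u')).length + 1 : Nat) : Int) by push_cast; ring]
          rw [PySem.List.slice_from _ (by positivity)]
          rw [Int.toNat_natCast, hL4, show P ++ 'u' :: R.takeWhile (fun c => c == 'u') ++ R.dropWhile (fun c => c == 'u')
              = (P ++ 'u' :: R.takeWhile (fun c => c == 'u')) ++ R.dropWhile (fun c => c == 'u') by simp]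
          apply List.drop_left'
          simp
          omega
        simp only [hfind, hhead, hrfind]
        push_cast at hall hslice2 ⊢
        simp [hall, hslice1, hslice2, hpne,
          show ¬ ((P.length : Int) + (R.takeWhile (fun c => c == 'u')).length + 1 = 0) by omega]
        constructor
        · intro h; exact h.symm
        · intro h; exact h.symm
  · -- no 'u' anywhere: both sides are false
    rw [pvB_no_u L hu]
    cases L with
    | nil => simp
    | cons a t =>
      have ha : ¬ a = 'u' := fun h => hu (h ▸ List.mem_cons_self)
      have hfind : PySem.Chars.find (a :: t) ['u'] = -1 := by
        rw [PySem.Chars.find_eq_neg_one_iff]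
        intro hin
        exact hu (hin.subset (by simp))
      simp [hfind, PySem.List.pyGetD_zero_cons, ha]
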